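-- pv_equiv track=rewrite | github.com/dost0092/hotel-brands-scraper | scrapers/marriott.py | extract_city_state_country
-- ===== SOURCE A (Python) =====
-- def extract_city_state_country(city_postal_text):
--     # Example: "Agoura Hills, California, USA, 91301"
--     city = state = country = ""
--     if not city_postal_text:
--         return city, state, country
--     # Remove trailing postal if present
--     parts = [p.strip() for p in city_postal_text.split(",")]
--     # Heuristic: last is postal or country; find USA-like country tokens
--     # Try to map by known patterns: City, State, Country [, Postal]
--     if len(parts) >= 3:
--         city = parts[0]
--         state = parts[1]
--         country = parts[2]
--     elif len(parts) == 2: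
--         city = parts[0]
--         state = parts[1]
--     else:
--         city = city_postal_text.strip()
--     return city, state, country
-- ===== SOURCE B (Python) =====
-- def extract_city_state_country(city_postal_text):
--     if not city_postal_text:
--         return "", "", ""
--     # single character-level pass: accumulate up to three comma-separated
--     # fields directly, stopping at the third comma (the rest is irrelevant)
--     fields = [[], [], []]
--     i = 0
--     for ch in city_postal_text:
--         if ch == ",":
--             i += 1
--             if i == 3:
--                 break
--         else:
--             fields[i].append(ch)
--     return ("".join(fields[0]).strip(),
--             "".join(fields[1]).strip(),
--             "".join(fields[2]).strip())
-- ===== Notes on version B (the rewrite author's own statement) =====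
-- stated objective: alternative
-- what changed: Replaces A's split-into-a-list-then-branch-on-length with a single character-level scan that accumulates at most three fields directly and breaks at the third comma, never materialising the full parts list.
import Mathlib
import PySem

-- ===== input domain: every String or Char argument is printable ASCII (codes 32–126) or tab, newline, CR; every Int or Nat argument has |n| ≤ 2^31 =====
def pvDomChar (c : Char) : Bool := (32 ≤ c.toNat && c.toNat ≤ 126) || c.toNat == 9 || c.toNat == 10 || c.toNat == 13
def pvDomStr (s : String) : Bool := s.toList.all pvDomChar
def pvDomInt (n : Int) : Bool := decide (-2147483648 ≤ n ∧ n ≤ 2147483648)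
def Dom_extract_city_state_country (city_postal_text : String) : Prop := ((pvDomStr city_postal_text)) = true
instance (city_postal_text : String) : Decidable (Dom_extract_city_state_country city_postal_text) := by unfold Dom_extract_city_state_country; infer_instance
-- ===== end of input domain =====

-- B replaces A's split-into-a-list-then-branch-on-length with a single character scan
-- accumulating at most three fields and breaking at the third comma; objective: alternative.

-- ===== PORT A =====
def extract_city_state_country (city_postal_text : String) : String × String × String :=
  -- city = state = country = ""; if not city_postal_text: return city, state, country
  if city_postal_text = "" then ("", "", "")
  else
    -- parts = [p.strip() for p in city_postal_text.split(",")]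
    let parts := ((PySem.Str.split? city_postal_text ",").getD []).map PySem.Str.strip
    if 3 ≤ parts.length then
      (parts.getD 0 "", parts.getD 1 "", parts.getD 2 "")     -- indices in range: len ≥ 3
    else if parts.length = 2 then
      (parts.getD 0 "", parts.getD 1 "", "")                  -- indices in range: len = 2
    else
      (PySem.Str.strip city_postal_text, "", "")

-- ===== PORT B =====
-- the for-loop over the characters, with the break at the third comma;
-- the three mutable field strings are carried as lists of characters
def ecscScan : List Char → Nat → List Char × List Char × List Char → List Char × List Char × List Char
  | [], _, fs => fs
  | ch :: rest, i, (f0, f1, f2) =>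
    if ch = ',' then
      if i + 1 = 3 then (f0, f1, f2)                          -- break
      else ecscScan rest (i + 1) (f0, f1, f2)
    else
      ecscScan rest i
        (match i with                                          -- fields[i] += ch
         | 0 => (f0 ++ [ch], f1, f2)
         | 1 => (f0, f1 ++ [ch], f2)
         | _ => (f0, f1, f2 ++ [ch]))

def extract_city_state_country_alt (city_postal_text : String) : String × String × String :=
  if city_postal_text = "" then ("", "", "")
  else
    let fs := ecscScan city_postal_text.toList 0 ([], [], [])
    (PySem.Str.strip (String.ofList fs.1),
     PySem.Str.strip (String.ofList fs.2.1),
     PySem.Str.strip (String.ofList fs.2.2))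

-- ===== PRECONDITION & SPEC =====
def Spec_extract_city_state_country (city_postal_text : String) (out : String × String × String) : Prop := out = extract_city_state_country_alt city_postal_text
instance (city_postal_text : String) (out : String × String × String) : Decidable (Spec_extract_city_state_country city_postal_text out) := by unfold Spec_extract_city_state_country; infer_instance

-- ===== CLAIM (what is proved, stated in full; the proofs are below) =====
def Claim_equal_extract_city_state_country : Prop := ∀ (city_postal_text : String), Dom_extract_city_state_country city_postal_text → Spec_extract_city_state_country city_postal_text (extract_city_state_country city_postal_text)

-- ===== LEMMAS AND PROOFS =====

-- proof-side functional characterization of splitting on a single comma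
def splitComma : List Char → List (List Char)
  | [] => [[]]
  | c :: rest =>
    if c = ',' then [] :: splitComma rest
    else
      match splitComma rest with
      | [] => [[c]]      -- unreachable: splitComma never returns []
      | p :: ps => (c :: p) :: ps

theorem splitComma_ne_nil (cs : List Char) : splitComma cs ≠ [] := by
  cases cs with
  | nil => simp [splitComma]
  | cons c rest =>
    unfold splitComma
    split
    · simp
    · split <;> simp

theorem splitComma_comma (rest : List Char) :
    splitComma (',' :: rest) = [] :: splitComma rest := by
  simp [splitComma]

theorem splitComma_ne (c : Char) (rest p : List Char) (ps : List (List Char))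
    (hc : c ≠ ',') (h : splitComma rest = p :: ps) :
    splitComma (c :: rest) = (c :: p) :: ps := by
  unfold splitComma
  rw [if_neg hc, h]

theorem strip_empty : PySem.Str.strip "" = "" := by decide

theorem splitOn_go_eq (fuel : Nat) (l cur : List Char) (acc : List (List Char))
    (h : l.length < fuel) :
    PySem.Chars.splitOn.go [','] fuel l cur acc
      = acc.reverse ++ (splitComma l).modifyHead (cur.reverse ++ ·) := by
  induction fuel generalizing l cur acc with
  | zero => omega
  | succ fuel ih =>
    cases l with
    | nil => simp [PySem.Chars.splitOn.go, splitComma]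
    | cons c rest =>
      rw [PySem.Chars.splitOn.go]
      by_cases hc : c = ','
      · subst hc
        rw [if_pos (by simp [List.isPrefixOf])]
        have hd : List.drop [','].length (',' :: rest) = rest := rfl
        rw [hd, ih rest [] (List.reverse cur :: acc) (by simp at h ⊢; omega)]
        rw [splitComma_comma]
        rcases splitComma rest <;> simp
      · rw [if_neg (by simp [List.isPrefixOf]; exact fun h => hc h.symm)]
        rw [ih rest (c :: cur) acc (by simp at h ⊢; omega)]
        rcases hsp : splitComma rest with _ | ⟨p, ps⟩
        · exact absurd hsp (splitComma_ne_nil rest)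
        · rw [splitComma_ne c rest p ps hc hsp]
          simp
theorem splitOn_eq_splitComma (cs : List Char) :
    PySem.Chars.splitOn cs [','] = splitComma cs := by
  unfold PySem.Chars.splitOn
  rw [splitOn_go_eq (cs.length + 1) cs [] [] (by omega)]
  rcases hsp : splitComma cs with _ | ⟨p, ps⟩
  · exact absurd hsp (splitComma_ne_nil cs)
  · simp

-- a one-piece splitComma means the string contains no comma and the piece is the input
theorem splitComma_singleton (cs p : List Char) (h : splitComma cs = [p]) : p = cs := by
  induction cs generalizing p with
  | nil => simp [splitComma] at h; omega
  | cons c rest ih =>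
    by_cases hc : c = ','
    · subst hc
      rw [splitComma_comma] at h
      obtain ⟨rfl, h2⟩ := by simpa using h
      exact absurd h2 (splitComma_ne_nil rest)
    · rcases hsp : splitComma rest with _ | ⟨q, qs⟩
      · exact absurd hsp (splitComma_ne_nil rest)
      · rw [splitComma_ne c rest q qs hc hsp] at h
        obtain ⟨rfl, h2⟩ := by simpa using h
        obtain rfl : qs = [] := h2.symm ▸ rfl
        rw [ih q hsp]

-- scan after the second comma: only the third field grows, up to the next comma
theorem ecscScan_two (cs f0 f1 f2 : List Char) :
    ecscScan cs 2 (f0, f1, f2) = (f0, f1, f2 ++ (splitComma cs).headD []) := by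
  induction cs generalizing f2 with
  | nil => simp [ecscScan, splitComma]
  | cons c rest ih =>
    unfold ecscScan
    by_cases hc : c = ','
    · subst hc; rw [splitComma_comma]; simp
    · rw [if_neg hc, ih (f2 ++ [c])]
      rcases hsp : splitComma rest with _ | ⟨p, ps⟩
      · exact absurd hsp (splitComma_ne_nil rest)
      · rw [splitComma_ne c rest p ps hc hsp]
        simp

-- scan after the first comma: the second and third fields receive the next pieces
theorem ecscScan_one (cs f0 f1 f2 : List Char) :
    ecscScan cs 1 (f0, f1, f2)
      = match splitComma cs with
        | [p0] => (f0, f1 ++ p0, f2)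
        | p0 :: p1 :: _ => (f0, f1 ++ p0, f2 ++ p1)
        | [] => (f0, f1, f2) := by
  induction cs generalizing f1 with
  | nil => simp [ecscScan, splitComma]
  | cons c rest ih =>
    unfold ecscScan
    by_cases hc : c = ','
    · subst hc
      rw [if_pos rfl, if_neg (by omega), ecscScan_two, splitComma_comma]
      rcases hsp : splitComma rest with _ | ⟨p, ps⟩
      · exact absurd hsp (splitComma_ne_nil rest)
      · simp
    · rw [if_neg hc, ih (f1 ++ [c])]
      rcases hsp : splitComma rest with _ | ⟨p, ps⟩
      · exact absurd hsp (splitComma_ne_nil rest)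
      · rw [splitComma_ne c rest p ps hc hsp]
        rcases ps with _ | ⟨q, qs⟩ <;> simp

-- scan from the start: the three fields are the first three pieces of the comma split
theorem ecscScan_zero (cs f0 f1 f2 : List Char) :
    ecscScan cs 0 (f0, f1, f2)
      = match splitComma cs with
        | [p0] => (f0 ++ p0, f1, f2)
        | [p0, p1] => (f0 ++ p0, f1 ++ p1, f2)
        | p0 :: p1 :: p2 :: _ => (f0 ++ p0, f1 ++ p1, f2 ++ p2)
        | [] => (f0, f1, f2) := by
  induction cs generalizing f0 with
  | nil => simp [ecscScan, splitComma]
  | cons c rest ih =>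
    unfold ecscScan
    by_cases hc : c = ','
    · subst hc
      rw [if_pos rfl, if_neg (by omega), ecscScan_one, splitComma_comma]
      rcases hsp : splitComma rest with _ | ⟨p, ps⟩
      · exact absurd hsp (splitComma_ne_nil rest)
      · rcases ps with _ | ⟨q, qs⟩ <;> simp
    · rw [if_neg hc, ih (f0 ++ [c])]
      rcases hsp : splitComma rest with _ | ⟨p, ps⟩
      · exact absurd hsp (splitComma_ne_nil rest)
      · rw [splitComma_ne c rest p ps hc hsp]
        rcases ps with _ | ⟨q, qs⟩
        · simp
        · rcases qs with _ | ⟨r, rs⟩ <;> simp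

theorem extract_spec_aux (s : String) (hs : s ≠ "") :
    extract_city_state_country s = extract_city_state_country_alt s := by
  unfold extract_city_state_country extract_city_state_country_alt
  simp only [if_neg hs]
  have hsplit : PySem.Str.split? s ","
      = some ((splitComma s.toList).map String.ofList) := by
    simp [PySem.Str.split?, PySem.Chars.split?, splitOn_eq_splitComma]
  rw [hsplit, ecscScan_zero]
  rcases hsp : splitComma s.toList with _ | ⟨p0, ps⟩
  · exact absurd hsp (splitComma_ne_nil s.toList)
  · rcases ps with _ | ⟨p1, ps⟩
    · -- one piece: it is the whole input, so strip p0 = strip s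
      obtain rfl : p0 = s.toList := splitComma_singleton _ _ hsp
      simp [strip_empty]
    · rcases ps with _ | ⟨p2, ps⟩
      · simp [strip_empty]
      · simp [List.getD]

-- ===== VERDICT (by name: the statement is the Claim_ definition above) =====
theorem extract_city_state_country_spec : Claim_equal_extract_city_state_country := by
  intro s _
  unfold Spec_extract_city_state_country
  by_cases hs : s = ""
  · subst hs; rfl
  · exact extract_spec_aux s hs
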